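-- pv_equiv track=rewrite | github.com/ExclusionProcess-tools/TASEPy | TASEPy.py | stacked_config
-- ===== SOURCE A (Python) =====
-- def N_max(L, ll=1):
--   '''
--   Returns the maximum number of particles that can fit onto the lattice of
--   size L. Particle size ll is optional (=1 by default).
--   '''
--
--   Nmax = 0
--   i = 1
--   xi = 1
--   while xi <= L:
--     Nmax += 1
--     i += 1
--     xi = 1 + (i-1)*ll
--
--   return Nmax
--
-- def stacked_config(npsa, L, ll=1):
--   '''
--   Returns a stacked configuration of order npsa. The result is a list x of
--   size npsa, where x[i-1] is the position of the i-th particle. If npsa is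
--   smaller or equal to Nmax, where Nmax is the maximum number of particles
--   that can fit onto the lattice, then the resulting configuration has npsa
--   particles, otherwise it has Nmax particles.
--   '''
--
--   Nmax = N_max(L, ll)
--   if npsa > Nmax:
--     npsa = Nmax
--
--   # initialize list
--   x = []
--
--   if npsa > 0:
--     # stack all particles
--     i = 1
--     xi = 1
--     while (xi <= L and i <= npsa):
--       x.append(xi)
--       i += 1
--       if i <= npsa:
--         xi = 1 + (i-1)*ll
--
--   return x
-- ===== SOURCE B (Python) =====
-- def stacked_config(npsa, L, ll=1):
--     nmax = 0 if L < 1 else (L - 1) // ll + 1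
--     n = min(npsa, nmax)
--     if n < 0:
--         n = 0
--     return [1 + i * ll for i in range(n)]
-- ===== Notes on version B (the rewrite author's own statement) =====
-- stated objective: simpler
-- what changed: Replaces A's N_max counting while-loop and the guarded particle-stacking while-loop by closed-form arithmetic: Nmax = 0 if L < 1 else (L-1)//ll + 1, n = max(0, min(npsa, Nmax)), and the result is the single comprehension [1 + i*ll for i in range(n)].
-- outside the precondition, e.g. on stacked_config(2, 5, 0): A does not finish within the time limit, B raises ZeroDivisionError; on stacked_config(2, 5, -1): A does not finish within the time limit, B returns []
import Mathlib
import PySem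

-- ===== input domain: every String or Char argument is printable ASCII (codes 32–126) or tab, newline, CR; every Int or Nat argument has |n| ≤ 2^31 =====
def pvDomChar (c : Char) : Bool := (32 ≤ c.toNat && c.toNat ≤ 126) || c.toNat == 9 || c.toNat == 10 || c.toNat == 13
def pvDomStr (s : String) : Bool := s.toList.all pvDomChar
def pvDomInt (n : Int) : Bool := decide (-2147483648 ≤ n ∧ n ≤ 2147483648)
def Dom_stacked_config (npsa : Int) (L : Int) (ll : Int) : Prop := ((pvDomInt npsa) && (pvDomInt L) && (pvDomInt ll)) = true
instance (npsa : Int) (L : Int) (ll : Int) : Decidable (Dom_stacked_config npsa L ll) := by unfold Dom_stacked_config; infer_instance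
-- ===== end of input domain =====

-- B replaces A's two counting loops by closed-form arithmetic: Nmax = (L-1)//ll + 1 (0 if L < 1)
-- and the positions as a single range comprehension (objective: simpler).

-- ===== PORT A =====
-- A's N_max while-loop; fuel only makes the recursion total (the loop runs at most L times on Pre_).
def nmaxLoop (fuel : Nat) (L ll Nmax i xi : Int) : Int :=
  match fuel with
  | 0 => Nmax
  | fuel + 1 =>
      if xi ≤ L then nmaxLoop fuel L ll (Nmax + 1) (i + 1) (1 + ((i + 1) - 1) * ll)
      else Nmax

def N_max (L ll : Int) : Int := nmaxLoop (L.toNat + 1) L ll 0 1 1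

-- A's particle-stacking while-loop (append xi; i += 1; update xi only if i ≤ npsa).
def stackLoop (fuel : Nat) (L ll npsa : Int) (x : List Int) (i xi : Int) : List Int :=
  match fuel with
  | 0 => x
  | fuel + 1 =>
      if xi ≤ L ∧ i ≤ npsa then
        let x' := x ++ [xi]
        let i' := i + 1
        let xi' := if i' ≤ npsa then 1 + (i' - 1) * ll else xi
        stackLoop fuel L ll npsa x' i' xi'
      else x

def stacked_config (npsa : Int) (L : Int) (ll : Int) : List Int :=
  let Nmax := N_max L ll
  let npsa' := if npsa > Nmax then Nmax else npsa
  if npsa' > 0 then stackLoop (L.toNat + 1) L ll npsa' [] 1 1 else []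

-- ===== PORT B =====
def stacked_config_alt (npsa : Int) (L : Int) (ll : Int) : List Int :=
  let nmax := if L < 1 then 0 else PySem.Int.floordiv (L - 1) ll + 1
  let n := min npsa nmax
  let n' := if n < 0 then 0 else n
  (PySem.List.pyRange 0 n' 1).map (fun i => 1 + i * ll)

-- ===== PRECONDITION & SPEC =====
-- Pre_ excludes ll ≤ 0 with L ≥ 1: there A's while-loops never terminate (xi never grows past L).
def Pre_stacked_config (npsa : Int) (L : Int) (ll : Int) : Prop := 1 ≤ ll ∨ L < 1
instance (npsa : Int) (L : Int) (ll : Int) : Decidable (Pre_stacked_config npsa L ll) := by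
  unfold Pre_stacked_config; infer_instance

def pvWitness_stacked_config : Int × Int × Int := (3, 10, 2)

def Spec_stacked_config (npsa : Int) (L : Int) (ll : Int) (out : List Int) : Prop := out = stacked_config_alt npsa L ll
instance (npsa : Int) (L : Int) (ll : Int) (out : List Int) : Decidable (Spec_stacked_config npsa L ll out) := by unfold Spec_stacked_config; infer_instance

-- ===== CLAIM (what is proved, stated in full; the proofs are below) =====
def Claim_equal_stacked_config : Prop := ∀ (npsa : Int) (L : Int) (ll : Int), Dom_stacked_config npsa L ll → Pre_stacked_config npsa L ll → Spec_stacked_config npsa L ll (stacked_config npsa L ll)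

-- ===== LEMMAS AND PROOFS =====

-- `M L ll` is the closed-form bound: i-th particle fits iff i ≤ M (for ll ≥ 1).
def M (L ll : Int) : Int := PySem.Int.floordiv (L - 1) ll + 1

lemma pos_le_iff (L ll i : Int) (hll : 1 ≤ ll) :
    1 + (i - 1) * ll ≤ L ↔ i ≤ M L ll := by
  unfold M
  rw [PySem.Int.floordiv_eq_ediv_of_pos (by omega)]
  constructor
  · intro h
    have : i - 1 ≤ (L - 1) / ll := Int.le_ediv_iff_mul_le (by omega) |>.mpr (by omega)
    omega
  · intro h
    have h1 : i - 1 ≤ (L - 1) / ll := by omega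
    have h2 : (i - 1) * ll ≤ (L - 1) / ll * ll :=
      mul_le_mul_of_nonneg_right h1 (by omega)
    have h3 : (L - 1) / ll * ll ≤ L - 1 := Int.ediv_mul_le _ (by omega)
    omega

lemma nmaxLoop_eq (L ll : Int) (hll : 1 ≤ ll) :
    ∀ (fuel : Nat) (N i : Int), M L ll - i + 1 ≤ (fuel : Int) →
      nmaxLoop fuel L ll N i (1 + (i - 1) * ll) = N + max 0 (M L ll - i + 1) := by
  intro fuel
  induction fuel with
  | zero => intro N i h; simp [nmaxLoop]; omega
  | succ f ih =>
      intro N i h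
      rw [nmaxLoop]
      by_cases hc : 1 + (i - 1) * ll ≤ L
      · have hi : i ≤ M L ll := (pos_le_iff L ll i hll).mp hc
        rw [if_pos hc]
        have := ih (N + 1) (i + 1) (by push_cast at h ⊢; omega)
        simpa using this.trans (by omega)
      · have hi : ¬ i ≤ M L ll := fun h' => hc ((pos_le_iff L ll i hll).mpr h')
        rw [if_neg hc]
        omega

lemma N_max_eq (L ll : Int) (hL : -2147483648 ≤ L) (hll : 1 ≤ ll) :
    N_max L ll = max 0 (M L ll) := by
  unfold N_max
  have h := nmaxLoop_eq L ll hll (L.toNat + 1) 0 1 ?_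
  · norm_num at h
    omega
  · have : M L ll ≤ L ∨ M L ll ≤ 0 := by
      unfold M
      by_cases h : 1 ≤ L
      · left
        rw [PySem.Int.floordiv_eq_ediv_of_pos (by omega)]
        have : (L - 1) / ll ≤ L - 1 := Int.ediv_le_self _ (by omega)
        omega
      · right
        have : PySem.Int.floordiv (L - 1) ll < 0 := by
          rw [PySem.Int.floordiv_lt_iff_lt_mul (by omega)]; omega
        omega
    push_cast
    omega

lemma stackLoop_eq (L ll n : Int) (hll : 1 ≤ ll) (hn : n ≤ M L ll) :
    ∀ (fuel : Nat) (acc : List Int) (i : Int), i ≤ n → n - i + 2 ≤ (fuel : Int) →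
      stackLoop fuel L ll n acc i (1 + (i - 1) * ll) =
        acc ++ (PySem.List.pyRange (i - 1) n 1).map (fun j => 1 + j * ll) := by
  intro fuel
  induction fuel with
  | zero => intro acc i hi h; push_cast at h; omega
  | succ f ih =>
      intro acc i hi h
      have hxi : 1 + (i - 1) * ll ≤ L := (pos_le_iff L ll i hll).mpr (by omega)
      rw [stackLoop, if_pos ⟨hxi, hi⟩]
      simp only
      rw [PySem.List.pyRange_one_cons (by omega : i - 1 < n)]
      by_cases hi' : i + 1 ≤ n
      · rw [if_pos hi']
        rw [show (i - 1) + 1 = (i + 1) - 1 by ring] at *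
        have := ih (acc ++ [1 + (i - 1) * ll]) (i + 1) hi' (by push_cast at h ⊢; omega)
        simpa using this
      · rw [if_neg hi']
        have hin : i = n := by omega
        -- one more unfold: loop exits since i + 1 > n
        have hf : 1 ≤ f := by push_cast at h; omega
        obtain ⟨f', rfl⟩ : ∃ f', f = f' + 1 := ⟨f - 1, by omega⟩
        rw [stackLoop, if_neg (by omega)]
        rw [show (i - 1) + 1 = n from by omega, PySem.List.pyRange_one_eq_nil (by omega)]
        simp

lemma alt_nmax (L ll : Int) (hll : 1 ≤ ll) :
    (if L < 1 then 0 else PySem.Int.floordiv (L - 1) ll + 1) = max 0 (M L ll) := by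
  unfold M
  split_ifs with h
  · have : PySem.Int.floordiv (L - 1) ll < 0 := by
      rw [PySem.Int.floordiv_lt_iff_lt_mul (by omega)]; omega
    omega
  · rw [PySem.Int.floordiv_eq_ediv_of_pos (by omega)]
    have : 0 ≤ (L - 1) / ll := Int.ediv_nonneg (by omega) (by omega)
    omega

-- ===== VERDICT (by name: the statement is the Claim_ definition above) =====
theorem stacked_config_spec : Claim_equal_stacked_config := by
  intro npsa L ll hdom hpre
  unfold Spec_stacked_config stacked_config stacked_config_alt
  have hdomL : -2147483648 ≤ L := by
    simp [Dom_stacked_config, pvDomInt] at hdom; omega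
  rcases hpre with hll | hL
  · -- ll ≥ 1: closed forms apply
    rw [N_max_eq L ll hdomL hll, alt_nmax L ll hll]
    set Nm := max 0 (M L ll) with hNm
    simp only
    by_cases hpos : (if npsa > Nm then Nm else npsa) > 0
    · rw [if_pos hpos]
      set n := if npsa > Nm then Nm else npsa with hn
      have hn1 : 1 ≤ n := hpos
      have hcase : (npsa > Nm ∧ n = Nm) ∨ (¬ npsa > Nm ∧ n = npsa) := by
        by_cases h : npsa > Nm
        · exact Or.inl ⟨h, by rw [hn, if_pos h]⟩
        · exact Or.inr ⟨h, by rw [hn, if_neg h]⟩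
      have hnM : n ≤ M L ll := by rcases hcase with ⟨h, he⟩ | ⟨h, he⟩ <;> omega
      have hmin : (if min npsa Nm < 0 then 0 else min npsa Nm) = n := by
        rcases hcase with ⟨h, he⟩ | ⟨h, he⟩ <;> omega
      rw [hmin]
      have hfuel : n - 1 + 2 ≤ ((L.toNat + 1 : Nat) : Int) := by
        have : n ≤ L := by
          have := (pos_le_iff L ll n hll).mpr hnM
          nlinarith
        push_cast
        omega
      have h := stackLoop_eq L ll n hll hnM (L.toNat + 1) [] 1 hn1 hfuel
      norm_num at h
      rw [h]
    · rw [if_neg hpos]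
      have : min npsa Nm ≤ 0 := by
        by_cases h : npsa > Nm
        · rw [if_pos h] at hpos; omega
        · rw [if_neg h] at hpos; omega
      have hz : (if min npsa Nm < 0 then 0 else min npsa Nm) ≤ 0 := by omega
      rw [PySem.List.pyRange_one_eq_nil (by omega)]
      simp
  · -- L < 1, any ll: both loops/ranges are empty
    have hNmax : N_max L ll = 0 := by
      unfold N_max nmaxLoop
      rw [if_neg (by omega)]
    rw [hNmax]
    simp only [if_pos hL]
    by_cases hpos : (if npsa > 0 then (0:Int) else npsa) > 0
    · by_cases h : 0 < npsa
      · rw [if_pos h] at hpos; omega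
      · rw [if_neg (by omega)] at hpos; omega
    · rw [if_neg hpos]
      have : min npsa 0 ≤ 0 := by omega
      rw [PySem.List.pyRange_one_eq_nil (by omega)]
      simp
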